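-- pv_equiv track=rewrite | github.com/ethanm88/Complementary-Performance | train/preprocess_stance.py | reconstruct_xml
-- ===== SOURCE A (Python) =====
-- def reconstruct_xml(word_list, designations, reverse_sal_dict={0:['<sal0>','</sal0>'], 1:['<sal1>','</sal1>'], -1:[' ',' ']}):
--     '''
--     Deconstructed designations are -1 for unhighlighted, 0 for class 0, and 1 for class 1
--     markers are removed
--     '''
--     constructed_xml = []
--     for i in range(len(designations)):
--         if i == 0:
--             constructed_xml.append(reverse_sal_dict[designations[i]][0])
--         elif designations[i - 1] != designations[i]:
--              constructed_xml.extend([reverse_sal_dict[designations[i - 1]][1], reverse_sal_dict[designations[i]][0]])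
--         constructed_xml.append(word_list[i])
--     constructed_xml.append(reverse_sal_dict[designations[-1]][1])
--     new_text = ' '.join([x for x in constructed_xml if x!='[PAD]' and x!='[CLS]' and x!='[SEP]' and x != ' '])
--     return new_text
-- ===== SOURCE B (Python) =====
-- def reconstruct_xml(word_list, designations, reverse_sal_dict={0:['<sal0>','</sal0>'], 1:['<sal1>','</sal1>'], -1:[' ',' ']}):
--     groups = []
--     for w, d in zip(word_list, designations):
--         if groups and groups[-1][0] == d:
--             groups[-1][1].append(w)
--         else:
--             groups.append((d, [w]))
--     tokens = []
--     for d, ws in groups: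
--         tags = reverse_sal_dict[d]
--         tokens.append(tags[0])
--         tokens.extend(ws)
--         tokens.append(tags[1])
--     return ' '.join(t for t in tokens if t not in ('[PAD]', '[CLS]', '[SEP]', ' '))
-- ===== Notes on version B (the rewrite author's own statement) =====
-- stated objective: simpler
-- what changed: Replaces the index loop with its i-1 lookback over range(len(designations)) by zipping words with designations, grouping them into maximal runs of equal designation, and expanding each run as open-tag, words, close-tag.
import Mathlib
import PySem

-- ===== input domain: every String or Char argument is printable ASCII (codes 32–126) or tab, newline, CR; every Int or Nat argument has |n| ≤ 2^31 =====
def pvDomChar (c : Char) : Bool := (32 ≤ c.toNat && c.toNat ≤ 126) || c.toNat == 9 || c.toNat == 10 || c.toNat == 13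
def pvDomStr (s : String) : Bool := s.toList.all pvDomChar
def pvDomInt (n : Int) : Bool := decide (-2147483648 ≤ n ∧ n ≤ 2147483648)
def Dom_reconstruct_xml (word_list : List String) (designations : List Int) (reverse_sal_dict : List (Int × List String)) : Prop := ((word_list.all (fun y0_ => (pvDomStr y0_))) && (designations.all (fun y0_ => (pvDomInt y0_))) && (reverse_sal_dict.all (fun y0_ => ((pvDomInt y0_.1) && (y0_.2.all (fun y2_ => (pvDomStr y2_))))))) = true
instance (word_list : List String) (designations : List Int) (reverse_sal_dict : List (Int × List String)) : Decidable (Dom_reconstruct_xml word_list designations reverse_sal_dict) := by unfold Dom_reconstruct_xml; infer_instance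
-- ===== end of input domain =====

-- B groups the zipped (word, designation) pairs into maximal runs of equal designation and expands
-- each run as open-tag, words, close-tag, instead of A's index loop with an i-1 lookback (simpler decomposition).

-- shared helper: Python's reverse_sal_dict[k] — first-match association-list lookup (the default []
-- is never reached under Pre_, which demands every used key be present)
def rsdGet (reverse_sal_dict : List (Int × List String)) (k : Int) : List String :=
  (List.lookup k reverse_sal_dict).getD []

-- ===== PORT A =====
-- the body of A's `for i in range(len(designations))` loop, named so the proofs can speak about it
def aStep (word_list : List String) (designations : List Int) (rsd : List (Int × List String))
    (acc : List String) (i : Int) : List String :=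
  let acc :=
    if i = 0 then
      acc ++ [PySem.List.pyGetD (rsdGet rsd (PySem.List.pyGetD designations i 0)) 0 ""]
    else if PySem.List.pyGetD designations (i - 1) 0 ≠ PySem.List.pyGetD designations i 0 then
      acc ++ [PySem.List.pyGetD (rsdGet rsd (PySem.List.pyGetD designations (i - 1) 0)) 1 "",
              PySem.List.pyGetD (rsdGet rsd (PySem.List.pyGetD designations i 0)) 0 ""]
    else acc
  acc ++ [PySem.List.pyGetD word_list i ""]

def reconstruct_xml (word_list : List String) (designations : List Int) (reverse_sal_dict : List (Int × List String)) : String :=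
  let cx := (PySem.List.pyRange 0 (designations.length : Int) 1).foldl (aStep word_list designations reverse_sal_dict) []
  let cx := cx ++ [PySem.List.pyGetD (rsdGet reverse_sal_dict (PySem.List.pyGetD designations (-1) 0)) 1 ""]
  PySem.Str.join " " (cx.filter (fun x => x != "[PAD]" && x != "[CLS]" && x != "[SEP]" && x != " "))

-- ===== PORT B =====
-- B's run-grouping loop: start a fresh group, or extend the last group when its designation matches
def groupsB (pairs : List (String × Int)) : List (Int × List String) :=
  pairs.foldl (fun gs wd =>
    match gs.getLast? with
    | some g => if g.1 == wd.2 then gs.dropLast ++ [(g.1, g.2 ++ [wd.1])] else gs ++ [(wd.2, [wd.1])]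
    | none => gs ++ [(wd.2, [wd.1])]) []

def reconstruct_xml_alt (word_list : List String) (designations : List Int) (reverse_sal_dict : List (Int × List String)) : String :=
  let groups := groupsB (word_list.zip designations)
  let tokens := groups.foldl (fun acc g =>
    let tags := rsdGet reverse_sal_dict g.1
    acc ++ [PySem.List.pyGetD tags 0 ""] ++ g.2 ++ [PySem.List.pyGetD tags 1 ""]) []
  PySem.Str.join " " (tokens.filter (fun x => x != "[PAD]" && x != "[CLS]" && x != "[SEP]" && x != " "))

-- ===== PRECONDITION & SPEC =====
-- Pre_ excludes exactly the inputs on which the Python A raises: empty designations (IndexError at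
-- designations[-1]), word_list shorter than designations (IndexError), and a designation whose
-- dict entry is missing (KeyError) or shorter than two tags (IndexError).
def Pre_reconstruct_xml (word_list : List String) (designations : List Int) (reverse_sal_dict : List (Int × List String)) : Prop :=
  designations ≠ [] ∧ designations.length ≤ word_list.length ∧
    ∀ d ∈ designations, 2 ≤ ((List.lookup d reverse_sal_dict).getD []).length
instance (word_list : List String) (designations : List Int) (reverse_sal_dict : List (Int × List String)) : Decidable (Pre_reconstruct_xml word_list designations reverse_sal_dict) := by unfold Pre_reconstruct_xml; infer_instance

def pvWitness_reconstruct_xml : List String × List Int × (List (Int × List String)) :=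
  (["hi", "there"], [0, 1], [(0, ["<sal0>", "</sal0>"]), (1, ["<sal1>", "</sal1>"]), (-1, [" ", " "])])

def Spec_reconstruct_xml (word_list : List String) (designations : List Int) (reverse_sal_dict : List (Int × List String)) (out : String) : Prop := out = reconstruct_xml_alt word_list designations reverse_sal_dict
instance (word_list : List String) (designations : List Int) (reverse_sal_dict : List (Int × List String)) (out : String) : Decidable (Spec_reconstruct_xml word_list designations reverse_sal_dict out) := by unfold Spec_reconstruct_xml; infer_instance

-- ===== CLAIM (what is proved, stated in full; the proofs are below) =====
def Claim_equal_reconstruct_xml : Prop := ∀ (word_list : List String) (designations : List Int) (reverse_sal_dict : List (Int × List String)), Dom_reconstruct_xml word_list designations reverse_sal_dict → Pre_reconstruct_xml word_list designations reverse_sal_dict → Spec_reconstruct_xml word_list designations reverse_sal_dict (reconstruct_xml word_list designations reverse_sal_dict)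

-- ===== LEMMAS AND PROOFS =====

def expandG (rsd : List (Int × List String)) (gs : List (Int × List String)) : List String :=
  gs.foldl (fun acc g =>
    let tags := rsdGet rsd g.1
    acc ++ [PySem.List.pyGetD tags 0 ""] ++ g.2 ++ [PySem.List.pyGetD tags 1 ""]) []

def openTag (rsd : List (Int × List String)) (d : Int) : String := PySem.List.pyGetD (rsdGet rsd d) 0 ""
def closeTag (rsd : List (Int × List String)) (d : Int) : String := PySem.List.pyGetD (rsdGet rsd d) 1 ""

theorem expandG_snoc (rsd : List (Int × List String)) (gs : List (Int × List String)) (g : Int × List String) :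
    expandG rsd (gs ++ [g]) = expandG rsd gs ++ [openTag rsd g.1] ++ g.2 ++ [closeTag rsd g.1] := by
  simp [expandG, openTag, closeTag, List.foldl_append]

theorem groupsB_snoc (pairs : List (String × Int)) (p : String × Int) :
    groupsB (pairs ++ [p]) =
      (match (groupsB pairs).getLast? with
      | some g => if g.1 == p.2 then (groupsB pairs).dropLast ++ [(g.1, g.2 ++ [p.1])] else groupsB pairs ++ [(p.2, [p.1])]
      | none => groupsB pairs ++ [(p.2, [p.1])]) := by
  simp [groupsB, List.foldl_append]

def aTok (word_list : List String) (designations : List Int) (rsd : List (Int × List String)) (n : Nat) : List String :=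
  (List.range n).foldl (fun acc (k : Nat) => aStep word_list designations rsd acc (k : Int)) []

theorem aTok_succ (wl : List String) (ds : List Int) (rsd : List (Int × List String)) (n : Nat) :
    aTok wl ds rsd (n + 1) = aStep wl ds rsd (aTok wl ds rsd n) (n : Int) := by
  simp [aTok, List.range_succ, List.foldl_append]

-- the main invariant, by induction on the prefix length n
theorem main_inv (wl : List String) (ds : List Int) (rsd : List (Int × List String))
    (hlen : ds.length ≤ wl.length) :
    ∀ n, 1 ≤ n → n ≤ ds.length →
      aTok wl ds rsd n ++ [closeTag rsd (ds.getD (n - 1) 0)] = expandG rsd (groupsB ((wl.zip ds).take n))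
      ∧ (groupsB ((wl.zip ds).take n)).getLast?.map Prod.fst = some (ds.getD (n - 1) 0) := by
  intro n
  induction n with
  | zero => intro h; omega
  | succ n ih =>
    intro _ hle
    by_cases hn0 : n = 0
    · -- base case: the first iteration opens the first tag and pushes the first word
      subst hn0
      match ds, wl, hlen, hle with
      | d :: ds', w :: wl', _, _ =>
        constructor
        · simp [aTok, aStep, expandG, groupsB, closeTag, PySem.List.pyGetD_zero]
        · simp [groupsB]
    · have hn1 : 1 ≤ n := by omega
      have hnds : n < ds.length := by omega
      have hnwl : n < wl.length := by omega
      obtain ⟨ihe, ihl⟩ := ih hn1 (by omega)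
      obtain ⟨g, hg, hgfst⟩ : ∃ g, (groupsB ((wl.zip ds).take n)).getLast? = some g ∧ g.1 = ds.getD (n - 1) 0 := by
        cases h : (groupsB ((wl.zip ds).take n)).getLast? with
        | none => rw [h] at ihl; simp at ihl
        | some g => rw [h] at ihl; exact ⟨g, rfl, by simpa using ihl⟩
      obtain ⟨g1, g2⟩ := g
      have hg1 : g1 = ds.getD (n - 1) 0 := hgfst
      subst hg1
      have hzlen : n < (wl.zip ds).length := by simp [List.length_zip]; omega
      have htake : (wl.zip ds).take (n + 1) = (wl.zip ds).take n ++ [(wl[n], ds[n])] := by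
        rw [List.take_add_one]
        simp [List.getElem?_eq_getElem hzlen, List.getElem_zip]
      have hdn : ds.getD n 0 = ds[n] := List.getD_eq_getElem ds 0 hnds
      have hwn : wl.getD n "" = wl[n] := List.getD_eq_getElem wl "" hnwl
      have hstep : aStep wl ds rsd (aTok wl ds rsd n) (n : Int) =
          (if ds.getD (n - 1) 0 ≠ ds.getD n 0 then
            aTok wl ds rsd n ++ [closeTag rsd (ds.getD (n - 1) 0), openTag rsd (ds.getD n 0)]
          else aTok wl ds rsd n) ++ [wl.getD n ""] := by
        have hcast : ((n : Int) - 1) = ((n - 1 : Nat) : Int) := by omega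
        have hne : (n : Int) ≠ 0 := by exact_mod_cast hn0
        simp only [aStep, hne, hcast, PySem.List.pyGetD_natCast, openTag, closeTag]
        split_ifs <;> simp_all
      rw [aTok_succ, hstep, htake, groupsB_snoc, hg]
      simp only [Nat.add_sub_cancel]
      by_cases hpd : ds.getD (n - 1) 0 = ds.getD n 0
      · -- same designation: extend the last group / just push the word
        have hbeq : ((ds.getD (n - 1) 0) == (wl[n], ds[n]).2) = true := by
          show ((ds.getD (n - 1) 0) == ds[n]) = true
          rw [hpd, hdn]; exact beq_self_eq_true _
        obtain ⟨l', hl'⟩ : ∃ l', groupsB ((wl.zip ds).take n) = l' ++ [(ds.getD (n - 1) 0, g2)] :=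
          List.getLast?_eq_some_iff.mp hg
        have hdrop : (groupsB ((wl.zip ds).take n)).dropLast = l' := by
          rw [hl']; simp
        have hexp : expandG rsd l' ++ [openTag rsd (ds.getD (n - 1) 0)] ++ g2 = aTok wl ds rsd n := by
          have h2 := ihe
          rw [hl', expandG_snoc] at h2
          exact List.append_cancel_right h2.symm
        rw [if_neg (not_not_intro hpd), hbeq]
        rw [if_pos rfl, hdrop]
        constructor
        · rw [expandG_snoc, ← hexp, ← hpd, hwn]
          simp [List.append_assoc]
        · rw [List.getLast?_concat]
          simpa using hpd
      · -- new designation: close the previous tag and open a new group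
        have hprev : ds.getD (n - 1) 0 ≠ ds[n] := by rw [← hdn]; exact hpd
        have hbeq : ((ds.getD (n - 1) 0) == (wl[n], ds[n]).2) = false := by
          show ((ds.getD (n - 1) 0) == ds[n]) = false
          exact beq_eq_false_iff_ne.mpr hprev
        rw [hbeq, if_pos hpd]
        simp only [Bool.false_eq_true, if_false]
        constructor
        · rw [expandG_snoc, ← ihe, hdn, hwn]
          simp [List.append_assoc]
        · rw [List.getLast?_concat]
          simp only [Option.map_some]
          rw [hdn]

theorem reconstruct_xml_spec : Claim_equal_reconstruct_xml := by
  intro wl ds rsd _ hpre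
  obtain ⟨hne, hlen, -⟩ := hpre
  unfold Spec_reconstruct_xml
  have hpos : 1 ≤ ds.length := by
    cases ds with | nil => exact absurd rfl hne | cons a t => simp
  obtain ⟨hmain, -⟩ := main_inv wl ds rsd hlen ds.length hpos le_rfl
  have hclose : PySem.List.pyGetD ds (-1) 0 = ds.getD (ds.length - 1) 0 := by
    rw [PySem.List.pyGetD_neg_one ds 0 hne, List.getLast_eq_getElem,
        List.getD_eq_getElem ds 0 (by omega)]
  have htakeall : (wl.zip ds).take ds.length = wl.zip ds := by
    apply List.take_of_length_le
    simp [List.length_zip]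
  have hloop : (PySem.List.pyRange 0 (ds.length : Int) 1).foldl (aStep wl ds rsd) [] = aTok wl ds rsd ds.length := by
    rw [PySem.List.pyRange_zero_natCast, List.foldl_map]
    unfold aTok
    rfl
  show reconstruct_xml wl ds rsd = reconstruct_xml_alt wl ds rsd
  simp only [reconstruct_xml, reconstruct_xml_alt]
  rw [hloop, hclose]
  have hAtoks : aTok wl ds rsd ds.length ++ [PySem.List.pyGetD (rsdGet rsd (ds.getD (ds.length - 1) 0)) 1 ""] =
      expandG rsd (groupsB (wl.zip ds)) := by
    rw [← htakeall]
    exact hmain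
  rw [hAtoks]
  rfl

-- ===== VERDICT (by name: the statement is the Claim_ definition above) =====
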